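-- pv_equiv track=rewrite | github.com/athy125/PyFIXTest | pyfixtest/config/test_config.py | create_test_symbols
-- ===== SOURCE A (Python) =====
-- from typing import Dict, List, Optional, Any, Union
--
-- def create_test_symbols(count: int = 10, prefix: str = "TEST") -> List[str]:
--     """
--     Create test trading symbols.
--
--     Args:
--         count: Number of symbols to create
--         prefix: Symbol prefix
--
--     Returns:
--         List[str]: List of test symbols
--     """
--     base_symbols = ["AAPL", "MSFT", "GOOGL", "AMZN", "TSLA", "META", "NVDA", "JPM", "V", "JNJ"]
--     symbols = []
--
--     for i in range(count):
--         base = base_symbols[i % len(base_symbols)]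
--         symbol = f"{prefix}.{base}" if prefix else base
--         symbols.append(symbol)
--
--     return symbols
-- ===== SOURCE B (Python) =====
-- from typing import Dict, List, Optional, Any, Union
--
-- def create_test_symbols(count: int = 10, prefix: str = "TEST") -> List[str]:
--     """Create test trading symbols by replicating the prefixed base list and slicing."""
--     base_symbols = ["AAPL", "MSFT", "GOOGL", "AMZN", "TSLA", "META", "NVDA", "JPM", "V", "JNJ"]
--     prefixed = [f"{prefix}.{b}" for b in base_symbols] if prefix else list(base_symbols)
--     reps = (count + len(base_symbols) - 1) // len(base_symbols)
--     return (prefixed * reps)[:count]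
-- ===== Notes on version B (the rewrite author's own statement) =====
-- stated objective: idiomatic
-- what changed: B applies the prefix once over the 10 base symbols, replicates that list ceil(count/10) times and slices to count, instead of A's count-iteration loop with modular indexing and per-iteration prefix test.
import Mathlib
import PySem

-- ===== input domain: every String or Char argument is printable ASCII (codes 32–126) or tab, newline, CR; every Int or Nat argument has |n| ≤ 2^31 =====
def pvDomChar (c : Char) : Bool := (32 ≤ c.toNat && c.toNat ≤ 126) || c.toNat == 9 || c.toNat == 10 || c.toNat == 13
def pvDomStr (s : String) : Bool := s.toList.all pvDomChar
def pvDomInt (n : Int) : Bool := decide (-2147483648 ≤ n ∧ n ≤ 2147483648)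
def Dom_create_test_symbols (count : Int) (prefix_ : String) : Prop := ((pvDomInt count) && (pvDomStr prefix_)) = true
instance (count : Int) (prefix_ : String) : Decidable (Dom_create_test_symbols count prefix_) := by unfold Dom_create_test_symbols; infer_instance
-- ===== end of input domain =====

-- B builds the prefixed 10-symbol base list once, replicates it ceil(count/10) times and
-- slices to count, instead of A's per-index loop with modular indexing (objective: idiomatic).

-- ===== PORT A =====
-- 'for i in range(count): base = base_symbols[i % 10]; symbol = ... ; symbols.append(symbol)'
def create_test_symbols (count : Int) (prefix_ : String) : List String :=
  let base_symbols := ["AAPL", "MSFT", "GOOGL", "AMZN", "TSLA", "META", "NVDA", "JPM", "V", "JNJ"]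
  let symbols : List String := []
  (PySem.List.pyRange 0 count 1).foldl (fun symbols i =>
    -- base_symbols[i % len(base_symbols)]: i % 10 ∈ [0,10) so the index is always in range
    let base := PySem.List.pyGetD base_symbols (PySem.Int.mod i (base_symbols.length : Int)) ""
    let symbol := if prefix_ ≠ "" then prefix_ ++ "." ++ base else base
    symbols ++ [symbol]) symbols

-- ===== PORT B =====
-- prefixed = [f"{prefix}.{b}" for b in base] if prefix else list(base); (prefixed * reps)[:count]
def create_test_symbols_alt (count : Int) (prefix_ : String) : List String :=
  let base_symbols := ["AAPL", "MSFT", "GOOGL", "AMZN", "TSLA", "META", "NVDA", "JPM", "V", "JNJ"]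
  let prefixed := if prefix_ ≠ "" then base_symbols.map (fun b => prefix_ ++ "." ++ b) else base_symbols
  let reps := PySem.Int.floordiv (count + (base_symbols.length : Int) - 1) (base_symbols.length : Int)
  PySem.List.slice (PySem.List.pyRepeat prefixed reps) none (some count)

-- ===== PRECONDITION & SPEC =====
def Spec_create_test_symbols (count : Int) (prefix_ : String) (out : List String) : Prop := out = create_test_symbols_alt count prefix_
instance (count : Int) (prefix_ : String) (out : List String) : Decidable (Spec_create_test_symbols count prefix_ out) := by unfold Spec_create_test_symbols; infer_instance

-- ===== CLAIM (what is proved, stated in full; the proofs are below) =====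
def Claim_equal_create_test_symbols : Prop := ∀ (count : Int) (prefix_ : String), Dom_create_test_symbols count prefix_ → Spec_create_test_symbols count prefix_ (create_test_symbols count prefix_)

-- ===== LEMMAS AND PROOFS =====

-- element j of xs * r is xs[j % len(xs)]
theorem flatRep_getD {α : Type} (xs : List α) (d : α) :
    ∀ (r j : Nat), j < r * xs.length →
      ((List.replicate r xs).flatten).getD j d = xs.getD (j % xs.length) d := by
  intro r
  induction r with
  | zero => intro j hj; simp at hj
  | succ r ih =>
    intro j hj
    have hmul : (r + 1) * xs.length = xs.length + r * xs.length := by ring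
    have hlen : 0 < xs.length := by
      rcases Nat.eq_zero_or_pos xs.length with h | h
      · rw [h, Nat.mul_zero] at hj; omega
      · exact h
    rw [hmul] at hj
    rw [List.replicate_succ, List.flatten_cons]
    rcases Nat.lt_or_ge j xs.length with hc | hc
    · rw [List.getD_append _ _ _ _ hc, Nat.mod_eq_of_lt hc]
    · rw [List.getD_append_right _ _ _ _ hc, ih (j - xs.length) (by omega),
        Nat.mod_eq_sub_mod hc]

-- the cyclic result, index-free: both programs equal this map over range
theorem cyclic_take {α : Type} (xs : List α) (d : α) (n r : Nat)
    (hr : n ≤ r * xs.length) :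
    ((List.replicate r xs).flatten).take n
      = (List.range n).map (fun k => xs.getD (k % xs.length) d) := by
  have hlenflat : ((List.replicate r xs).flatten).length = r * xs.length := by
    simp [List.length_flatten]
  apply List.ext_getElem
  · simp [hlenflat]; omega
  · intro j h1 h2
    have hj : j < n := by simpa using h2
    have hjf : j < ((List.replicate r xs).flatten).length := by omega
    rw [List.getElem_take, List.getElem_map, List.getElem_range]
    rw [← List.getD_eq_getElem _ d hjf, flatRep_getD xs d r j (by omega)]

theorem create_test_symbols_eq (count : Int) (prefix_ : String) :
    create_test_symbols count prefix_ = create_test_symbols_alt count prefix_ := by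
  unfold create_test_symbols create_test_symbols_alt
  have hlen10 : (["AAPL", "MSFT", "GOOGL", "AMZN", "TSLA", "META", "NVDA", "JPM", "V", "JNJ"] : List String).length = 10 := rfl
  simp only [hlen10, Nat.cast_ofNat]
  set base : List String := ["AAPL", "MSFT", "GOOGL", "AMZN", "TSLA", "META", "NVDA", "JPM", "V", "JNJ"] with hbase
  set g : String → String := fun b => if prefix_ ≠ "" then prefix_ ++ "." ++ b else b with hg
  have hblen : base.length = 10 := by rw [hbase]; rfl
  -- the per-iteration body of A is g applied to the cyclically indexed base symbol
  have hA : (PySem.List.pyRange 0 count 1).foldl (fun symbols i =>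
        symbols ++ [if prefix_ ≠ "" then prefix_ ++ "." ++ PySem.List.pyGetD base (PySem.Int.mod i 10) ""
                    else PySem.List.pyGetD base (PySem.Int.mod i 10) ""]) []
      = (PySem.List.pyRange 0 count 1).map (fun i => g (PySem.List.pyGetD base (PySem.Int.mod i 10) "")) := by
    rw [PySem.List.foldl_append_singleton_eq_map]
    simp [hg]
  -- B's prefixed list is base.map g in both branches
  have hpref : (if prefix_ ≠ "" then base.map (fun b => prefix_ ++ "." ++ b) else base) = base.map g := by
    by_cases h : prefix_ ≠ "" <;> simp [hg, h]
  rw [hA, hpref]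
  rcases (by omega : count ≤ 0 ∨ 0 < count) with hneg | hpos
  · -- count ≤ 0: the range is empty and reps ≤ 0, so the replicated list is empty too
    have h1 : PySem.List.pyRange 0 count 1 = [] := by
      simp [PySem.List.pyRange]; omega
    have h2 : PySem.Int.floordiv (count + 10 - 1) 10 ≤ 0 := by
      rw [PySem.Int.floordiv_eq_ediv_of_pos (by omega)]; omega
    have h3 : PySem.List.pyRepeat (base.map g) (PySem.Int.floordiv (count + 10 - 1) 10) = [] := by
      rw [PySem.List.pyRepeat, Int.toNat_of_nonpos h2]; rfl
    rw [h1, h3]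
    simp [PySem.List.slice]
  · -- count > 0
    have hn : count = ((count.toNat : Nat) : Int) := by omega
    set n : Nat := count.toNat with hndef
    set R : Int := PySem.Int.floordiv (count + 10 - 1) 10 with hR
    have hRval : R = (count + 9) / 10 := by
      rw [hR, PySem.Int.floordiv_eq_ediv_of_pos (by omega)]; ring_nf
    have hRn : n ≤ R.toNat * 10 := by omega
    rw [hn, PySem.List.pyRange_zero_natCast]
    rw [PySem.List.pyRepeat, PySem.List.slice_to_natCast]
    rw [cyclic_take (base.map g) "" n R.toNat (by simpa [hblen] using hRn)]
    rw [List.map_map]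
    apply List.map_congr_left
    intro k hk
    simp only [Function.comp_apply, List.length_map, hblen]
    have hmod : PySem.Int.mod ((k : Nat) : Int) 10 = ((k % 10 : Nat) : Int) :=
      PySem.Int.mod_natCast k 10
    rw [hmod, PySem.List.pyGetD_natCast]
    have h1 : k % 10 < base.length := by rw [hblen]; omega
    have h2 : k % 10 < (base.map g).length := by simpa using h1
    rw [List.getD_eq_getElem _ _ h1, List.getD_eq_getElem _ _ h2, List.getElem_map]

-- ===== VERDICT (by name: the statement is the Claim_ definition above) =====
theorem create_test_symbols_spec : Claim_equal_create_test_symbols := by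
  intro count prefix_ _
  unfold Spec_create_test_symbols
  exact create_test_symbols_eq count prefix_
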